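-- pv_equiv track=rewrite | github.com/Scientific-Artificial-Intelligence-Lab/kd | kd/viz/_adapters/eqgpt.py | _split_equation
-- ===== SOURCE A (Python) =====
-- from typing import Any, Dict, Iterable, List, Optional, Tuple
--
-- def _split_equation(eq_str: str) -> List[str]:
--     """Split an EqGPT equation string into tokens.
--
--     Splits on +, *, / operators that appear at the top level
--     (not inside parentheses). Each operator becomes its own token.
--     """
--     tokens: List[str] = []
--     current: List[str] = []
--     depth = 0
--
--     for ch in eq_str:
--         if ch == '(':
--             depth += 1
--             current.append(ch)
--         elif ch == ')':
--             depth -= 1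
--             current.append(ch)
--         elif ch in ('+', '*', '/') and depth == 0:
--             # Flush current accumulated token
--             token = "".join(current).strip()
--             if token:
--                 tokens.append(token)
--             tokens.append(ch)
--             current = []
--         else:
--             current.append(ch)
--
--     # Flush remaining
--     token = "".join(current).strip()
--     if token:
--         tokens.append(token)
--
--     return tokens
-- ===== SOURCE B (Python) =====
-- from typing import List, Optional, Tuple
--
-- def _cut(s: str) -> Tuple[str, Optional[str], Optional[str]]:
--     """Find the first top-level +, * or / in s; return (prefix, op, suffix),
--     or (s, None, None) if there is none."""
--     depth = 0
--     for i, ch in enumerate(s):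
--         if ch == '(':
--             depth += 1
--         elif ch == ')':
--             depth -= 1
--         elif ch in ('+', '*', '/') and depth == 0:
--             return s[:i], ch, s[i + 1:]
--     return s, None, None
--
-- def _split_equation(eq_str: str) -> List[str]:
--     tokens: List[str] = []
--     rest = eq_str
--     while True:
--         seg, op, nxt = _cut(rest)
--         t = seg.strip()
--         if t:
--             tokens.append(t)
--         if op is None:
--             return tokens
--         tokens.append(op)
--         rest = nxt
-- ===== Notes on version B (the rewrite author's own statement) =====
-- stated objective: alternative
-- what changed: B replaces A's single accumulator-carrying pass (tokens + current buffer + running depth) by repeated cutting at the first top-level operator: a helper scans for the first +,*,/ at paren depth 0 and returns prefix, operator and suffix, and the outer loop emits the stripped prefix and the operator and restarts on the suffix.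
import Mathlib
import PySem

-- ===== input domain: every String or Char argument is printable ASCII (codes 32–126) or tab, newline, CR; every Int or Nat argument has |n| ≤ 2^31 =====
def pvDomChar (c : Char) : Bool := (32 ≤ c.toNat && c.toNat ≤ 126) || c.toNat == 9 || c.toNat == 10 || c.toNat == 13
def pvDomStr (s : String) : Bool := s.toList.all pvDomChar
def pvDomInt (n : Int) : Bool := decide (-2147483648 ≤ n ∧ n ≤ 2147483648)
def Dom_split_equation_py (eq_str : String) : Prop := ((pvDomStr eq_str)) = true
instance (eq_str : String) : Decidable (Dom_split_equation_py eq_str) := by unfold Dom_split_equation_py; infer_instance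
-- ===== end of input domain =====

-- B repeatedly cuts the string at the first
-- top-level operator instead of carrying A's token/buffer/depth accumulator state (alternative decomposition, same cost).

-- ===== PORT A =====
-- the for-loop of A: state = (tokens, current, depth)
def pvLoopA : List Char → List String → List Char → Int → List String
  | [], toks, cur, _ =>
      let token := PySem.Chars.strip cur
      if token = [] then toks else toks ++ [String.mk token]
  | c :: cs, toks, cur, depth =>
      if c = '(' then pvLoopA cs toks (cur ++ [c]) (depth + 1)
      else if c = ')' then pvLoopA cs toks (cur ++ [c]) (depth - 1)
      else if (c = '+' ∨ c = '*' ∨ c = '/') ∧ depth = 0 then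
        let token := PySem.Chars.strip cur
        pvLoopA cs ((if token = [] then toks else toks ++ [String.mk token]) ++ [String.mk [c]]) [] depth
      else pvLoopA cs toks (cur ++ [c]) depth

def split_equation_py (eq_str : String) : List String :=
  pvLoopA eq_str.toList [] [] 0

-- ===== PORT B =====
-- _cut: scan for the first +,*,/ at depth 0; return (prefix, none) or (prefix, some (op, suffix))
def pvCut : List Char → Int → List Char × Option (Char × List Char)
  | [], _ => ([], none)
  | c :: cs, depth =>
      if c = '(' then let r := pvCut cs (depth + 1); (c :: r.1, r.2)
      else if c = ')' then let r := pvCut cs (depth - 1); (c :: r.1, r.2)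
      else if (c = '+' ∨ c = '*' ∨ c = '/') ∧ depth = 0 then ([], some (c, cs))
      else let r := pvCut cs depth; (c :: r.1, r.2)

-- termination of the while-loop: the suffix after a found operator is strictly shorter
theorem pvCut_some_length : ∀ (cs : List Char) (d : Int) (c : Char) (r : List Char),
    (pvCut cs d).2 = some (c, r) → r.length < cs.length := by
  intro cs
  induction cs with
  | nil => intro d c r h; simp [pvCut] at h
  | cons x xs ih =>
      intro d c r h
      simp only [pvCut] at h
      split_ifs at h with h1 h2 h3 <;> simp at h
      · exact Nat.lt_succ_of_lt (ih (d + 1) c r h)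
      · exact Nat.lt_succ_of_lt (ih (d - 1) c r h)
      · obtain ⟨rfl, rfl⟩ := h; simp
      · exact Nat.lt_succ_of_lt (ih d c r h)

-- the while-loop of B
def pvLoopB (s : List Char) : List String :=
  match h : pvCut s 0 with
  | (seg, none) =>
      let t := PySem.Chars.strip seg
      if t = [] then [] else [String.mk t]
  | (seg, some (op, rest)) =>
      let t := PySem.Chars.strip seg
      (if t = [] then [] else [String.mk t]) ++ [String.mk [op]] ++ pvLoopB rest
termination_by s.length
decreasing_by exact pvCut_some_length s 0 op rest (by rw [h])

def split_equation_py_alt (eq_str : String) : List String :=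
  pvLoopB eq_str.toList

-- ===== PRECONDITION & SPEC =====
def Spec_split_equation_py (eq_str : String) (out : List String) : Prop := out = split_equation_py_alt eq_str
instance (eq_str : String) (out : List String) : Decidable (Spec_split_equation_py eq_str out) := by unfold Spec_split_equation_py; infer_instance

-- ===== CLAIM (what is proved, stated in full; the proofs are below) =====
def Claim_equal_split_equation_py : Prop := ∀ (eq_str : String), Dom_split_equation_py eq_str → Spec_split_equation_py eq_str (split_equation_py eq_str)

-- ===== LEMMAS AND PROOFS =====

theorem pvLoopB_none (s seg : List Char) (h : pvCut s 0 = (seg, none)) :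
    pvLoopB s = (if PySem.Chars.strip seg = [] then [] else [String.mk (PySem.Chars.strip seg)]) := by
  rw [pvLoopB]
  split
  · next seg' h' => rw [h] at h'; obtain ⟨rfl, -⟩ := Prod.mk.injEq .. ▸ h'; rfl
  · next seg' op' rest' h' => rw [h] at h'; simp at h'

theorem pvLoopB_some (s seg : List Char) (op : Char) (rest : List Char)
    (h : pvCut s 0 = (seg, some (op, rest))) :
    pvLoopB s = (if PySem.Chars.strip seg = [] then [] else [String.mk (PySem.Chars.strip seg)])
      ++ [String.mk [op]] ++ pvLoopB rest := by
  rw [pvLoopB]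
  split
  · next seg' h' => rw [h] at h'; simp at h'
  · next seg' op' rest' h' =>
      rw [h] at h'
      obtain ⟨h1, h2⟩ := Prod.mk.injEq .. ▸ h'
      obtain ⟨rfl, rfl⟩ := Prod.mk.injEq .. ▸ (Option.some.injEq .. ▸ h2)
      rw [h1]

-- net parenthesis depth of a character list
def pvNet : List Char → Int
  | [] => 0
  | c :: cs => (if c = '(' then 1 else if c = ')' then -1 else 0) + pvNet cs

theorem pvCut_append : ∀ (xs : List Char) (d : Int), pvCut xs d = (xs, none) →
    ∀ (cs : List Char),
    pvCut (xs ++ cs) d = (xs ++ (pvCut cs (d + pvNet xs)).1, (pvCut cs (d + pvNet xs)).2) := by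
  intro xs
  induction xs with
  | nil => intro d _ cs; simp [pvNet]
  | cons x t ih =>
      intro d h cs
      simp only [pvCut, pvNet, List.cons_append] at h ⊢
      split_ifs at h ⊢ with h1 h2 h3
      all_goals simp_all
      · have ht : pvCut t (d + 1) = (t, none) := Prod.ext h.1 h.2
        have := ih (d + 1) ht cs
        rw [show d + (1 + pvNet t) = d + 1 + pvNet t by ring]
        simp [this]
      · have ht : pvCut t (d - 1) = (t, none) := Prod.ext h.1 h.2
        have := ih (d - 1) ht cs
        rw [show d + (-1 + pvNet t) = d - 1 + pvNet t by ring]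
        simp [this]
      · have ht : pvCut t d = (t, none) := Prod.ext h.1 h.2
        have := ih d ht cs
        simp [this]

theorem pvNet_append (xs ys : List Char) : pvNet (xs ++ ys) = pvNet xs + pvNet ys := by
  induction xs with
  | nil => simp [pvNet]
  | cons x t ih => simp [pvNet, ih]; ring

theorem pvMain : ∀ (cs : List Char) (toks : List String) (cur : List Char),
    pvCut cur 0 = (cur, none) →
    pvLoopA cs toks cur (pvNet cur) = toks ++ pvLoopB (cur ++ cs) := by
  intro cs
  induction cs with
  | nil =>
      intro toks cur h
      rw [List.append_nil, pvLoopB_none cur cur h]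
      simp only [pvLoopA]
      split_ifs <;> simp
  | cons c cs ih =>
      intro toks cur h
      simp only [pvLoopA]
      by_cases h1 : c = '('
      · rw [if_pos h1]
        have hc1 : pvCut [c] (pvNet cur) = ([c], none) := by subst h1; simp [pvCut]
        have h' : pvCut (cur ++ [c]) 0 = (cur ++ [c], none) := by
          rw [pvCut_append cur 0 h [c], show (0 : Int) + pvNet cur = pvNet cur by ring, hc1]
        have hn : pvNet (cur ++ [c]) = pvNet cur + 1 := by
          subst h1; simp [pvNet_append, pvNet]
        rw [← hn, ih toks (cur ++ [c]) h']
        simp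
      · rw [if_neg h1]
        by_cases h2 : c = ')'
        · rw [if_pos h2]
          have hc1 : pvCut [c] (pvNet cur) = ([c], none) := by subst h2; simp [pvCut, h1]
          have h' : pvCut (cur ++ [c]) 0 = (cur ++ [c], none) := by
            rw [pvCut_append cur 0 h [c], show (0 : Int) + pvNet cur = pvNet cur by ring, hc1]
          have hn : pvNet (cur ++ [c]) = pvNet cur - 1 := by
            subst h2; simp [pvNet_append, pvNet, h1]; ring
          rw [← hn, ih toks (cur ++ [c]) h']
          simp
        · rw [if_neg h2]
          by_cases h3 : (c = '+' ∨ c = '*' ∨ c = '/') ∧ pvNet cur = 0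
          · rw [if_pos h3]
            obtain ⟨hop, hd⟩ := h3
            have hc1 : pvCut (c :: cs) (pvNet cur) = ([], some (c, cs)) := by
              rw [hd]
              rcases hop with rfl | rfl | rfl <;> simp [pvCut]
            have h' : pvCut (cur ++ c :: cs) 0 = (cur, some (c, cs)) := by
              rw [pvCut_append cur 0 h (c :: cs), show (0 : Int) + pvNet cur = pvNet cur by ring, hc1]
              simp
            have hz : pvNet cur = pvNet ([] : List Char) := by simp [pvNet, hd]
            rw [hz, ih _ ([] : List Char) (by simp [pvCut]), pvLoopB_some _ _ _ _ h']
            split_ifs <;> simp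
          · rw [if_neg h3]
            have hc1 : pvCut [c] (pvNet cur) = ([c], none) := by
              simp only [pvCut]
              rw [if_neg h1, if_neg h2, if_neg h3]
            have h' : pvCut (cur ++ [c]) 0 = (cur ++ [c], none) := by
              rw [pvCut_append cur 0 h [c], show (0 : Int) + pvNet cur = pvNet cur by ring, hc1]
            have hn : pvNet (cur ++ [c]) = pvNet cur := by
              simp [pvNet_append, pvNet, h1, h2]
            rw [← hn, ih toks (cur ++ [c]) h']
            simp

-- ===== VERDICT (by name: the statement is the Claim_ definition above) =====
theorem split_equation_py_spec : Claim_equal_split_equation_py := by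
  intro s _
  unfold Spec_split_equation_py split_equation_py split_equation_py_alt
  have := pvMain s.toList [] [] (by simp [pvCut])
  simpa [pvNet] using this
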